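-- pv_equiv track=rewrite | github.com/andrei-dragan/fp-a2 | program.py | distinct_sequence
-- ===== SOURCE A (Python) =====
-- def check_equality(number1, number2):
--     """
--     Check if two complex numbers are equal
--     :param number1: The first number
--     :param number2: The second number
--     :return: 1 if the numbers are equal, 0 otherwise
--     """
--     if get_real_part(number1) == get_real_part(number2) and get_imaginary_part(number1) == get_imaginary_part(number2):
--         return 1
--     else:
--         return 0
--
-- def distinct_sequence(complex_numbers):
--     """
--     Find the longest sequence of distinct complex numbers.
--     :param complex_numbers: The list of complex numbers
--     :return: A list consisting of the longest sequence of distinct complex numbers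
--     """
--     max_length = 0
--     answer = []
--
--     for i in range(0, len(complex_numbers)):
--         for j in range(i, len(complex_numbers)):
--             # We check every sequence from i to j
--             ok = 1  # We assume the sequence is correct
--             for k in range(i, j+1):
--                 # For every element in the sequence (i;j)
--                 # we check if there is another complex number equal with it
--                 for q in range(k+1, j+1):
--                     if check_equality(complex_numbers[k], complex_numbers[q]):
--                         ok = 0
--                         break
--
--                 if ok == 0:
--                     break  # There is no point going further
--
--             if ok == 1:  # If it's still 1, it means the sequence has only distinct numbers
--                 length = j - i + 1
--                 # This means we found a bigger sequence than what we already have and we update the new sequence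
--                 if length > max_length:
--                     max_length = length
--                     answer = complex_numbers[i:j+1]
--
--     return answer
--
-- def get_real_part(number):
--     return number[0]
--
-- def get_imaginary_part(number):
--     return number[1]
-- ===== SOURCE B (Python) =====
-- def distinct_sequence(complex_numbers):
--     """
--     Find the longest sequence of distinct complex numbers.
--     Sliding per-start scan with a hash set: for each start, extend while keys
--     (real, imaginary) are unseen; keep the first strictly-longest run.
--     """
--     n = len(complex_numbers)
--     best_start = 0
--     best_len = 0
--     for i in range(n):
--         seen = set()
--         j = i
--         while j < n:
--             key = (complex_numbers[j][0], complex_numbers[j][1])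
--             if key in seen:
--                 break
--             seen.add(key)
--             j += 1
--         if j - i > best_len:
--             best_len = j - i
--             best_start = i
--     return complex_numbers[best_start:best_start + best_len]
-- ===== Notes on version B (the rewrite author's own statement) =====
-- stated objective: faster
-- what changed: Replaced A's enumerate-every-window-and-recheck-all-pairs O(n^4) scan by a per-start run extension with a hash set of (real,imag) keys: for each start the window grows until the first repeated key, and the first strictly longest run is kept.
-- outside the precondition, e.g. on distinct_sequence([[]]): A returns [[]], B raises IndexError
import Mathlib
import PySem

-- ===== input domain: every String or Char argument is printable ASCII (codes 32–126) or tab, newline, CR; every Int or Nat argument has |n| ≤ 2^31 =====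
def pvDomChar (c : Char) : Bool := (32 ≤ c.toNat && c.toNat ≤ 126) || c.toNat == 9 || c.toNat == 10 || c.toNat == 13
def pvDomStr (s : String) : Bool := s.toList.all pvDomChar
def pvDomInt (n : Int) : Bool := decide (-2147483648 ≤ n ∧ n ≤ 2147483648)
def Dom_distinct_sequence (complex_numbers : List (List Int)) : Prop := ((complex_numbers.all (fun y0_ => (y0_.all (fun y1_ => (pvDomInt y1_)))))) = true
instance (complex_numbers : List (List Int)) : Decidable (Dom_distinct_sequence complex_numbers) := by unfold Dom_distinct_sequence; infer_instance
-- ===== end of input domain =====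

-- B replaces A's enumerate-every-window-and-recheck-all-pairs scan by a per-start run
-- extension with a set of (real, imag) keys; a timing run measured B faster.

-- ===== PORT A =====
-- get_real_part / get_imaginary_part: number[0], number[1] (total form pyGetD; Pre_ keeps indices in range)
def get_real_part (number : List Int) : Int := PySem.List.pyGetD number 0 0
def get_imaginary_part (number : List Int) : Int := PySem.List.pyGetD number 1 0

def check_equality (number1 number2 : List Int) : Int :=
  if get_real_part number1 = get_real_part number2 ∧
     get_imaginary_part number1 = get_imaginary_part number2 then 1 else 0

-- A's two inner loops over k and q computing `ok`; Python's `break` is modelled by the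
-- remaining iterations leaving the state unchanged once ok = 0.
def okFor (c : List (List Int)) (i j : Int) : Int :=
  (PySem.List.pyRange i (j + 1) 1).foldl (fun ok k =>
    if ok = 0 then ok else
      (PySem.List.pyRange (k + 1) (j + 1) 1).foldl (fun ok q =>
        if ok = 0 then ok else
          if check_equality (PySem.List.pyGetD c k []) (PySem.List.pyGetD c q []) = 1
          then 0 else ok) ok) 1

-- the i/j loops, carrying (max_length, answer)
def distinct_sequence (complex_numbers : List (List Int)) : List (List Int) :=
  ((PySem.List.pyRange 0 (complex_numbers.length : Int) 1).foldl
    (fun (st : Int × List (List Int)) i =>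
      (PySem.List.pyRange i (complex_numbers.length : Int) 1).foldl
        (fun st j =>
          if okFor complex_numbers i j = 1 then
            (if j - i + 1 > st.1 then
               (j - i + 1, PySem.List.slice complex_numbers (some i) (some (j + 1)))
             else st)
          else st) st)
    ((0 : Int), ([] : List (List Int)))).2

-- ===== PORT B =====
-- key of a complex number: the pair (real, imaginary) B hashes
def pvKey (x : List Int) : Int × Int := (PySem.List.pyGetD x 0 0, PySem.List.pyGetD x 1 0)

-- B's inner while loop: how many leading elements have pairwise-new keys (= j - i)
def pvRun : List (List Int) → PySem.Set (Int × Int) → Nat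
  | [], _ => 0
  | x :: xs, seen =>
      if seen.contains (pvKey x) then 0
      else pvRun xs (seen.add (pvKey x)) + 1

-- B's outer for loop over starts i, carrying (best_start, best_len)
def pvBest : List (List Int) → Int → Int × Int → Int × Int
  | [], _, b => b
  | x :: xs, i, b =>
      let r : Int := (pvRun (x :: xs) PySem.Set.empty : Nat)
      pvBest xs (i + 1) (if r > b.2 then (i, r) else b)

def distinct_sequence_alt (complex_numbers : List (List Int)) : List (List Int) :=
  let b := pvBest complex_numbers 0 (0, 0)
  PySem.List.slice complex_numbers (some b.1) (some (b.1 + b.2))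

-- ===== PRECONDITION & SPEC =====
-- Pre_ requires every element to be a proper complex pair (length ≥ 2): on shorter
-- elements Python A raises IndexError whenever it compares them (lists of two or more
-- numbers), and B, which always reads number[0]/number[1], raises IndexError there too.
def Pre_distinct_sequence (complex_numbers : List (List Int)) : Prop :=
  ∀ x ∈ complex_numbers, 2 ≤ x.length
instance (complex_numbers : List (List Int)) : Decidable (Pre_distinct_sequence complex_numbers) := by
  unfold Pre_distinct_sequence; infer_instance

def pvWitness_distinct_sequence : List (List Int) := [[1, 2], [3, 4], [1, 2], [5, 6]]

def Spec_distinct_sequence (complex_numbers : List (List Int)) (out : List (List Int)) : Prop := out = distinct_sequence_alt complex_numbers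
instance (complex_numbers : List (List Int)) (out : List (List Int)) : Decidable (Spec_distinct_sequence complex_numbers out) := by unfold Spec_distinct_sequence; infer_instance

-- ===== CLAIM (what is proved, stated in full; the proofs are below) =====
def Claim_equal_distinct_sequence : Prop := ∀ (complex_numbers : List (List Int)), Dom_distinct_sequence complex_numbers → Pre_distinct_sequence complex_numbers → Spec_distinct_sequence complex_numbers (distinct_sequence complex_numbers)

-- ===== LEMMAS AND PROOFS =====

-- check_equality returns 1 exactly on equal keys
theorem pv_checkEq (x y : List Int) : (check_equality x y = 1) ↔ pvKey x = pvKey y := by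
  unfold check_equality get_real_part get_imaginary_part pvKey
  split_ifs with h
  · simp [h.1, h.2]
  · simp only [Prod.ext_iff]
    constructor
    · intro h0; exact absurd h0 (by norm_num)
    · intro h0; exact absurd ⟨h0.1, h0.2⟩ h

-- a fold with an absorbing 0 state (A's `break`-able loops), Bool-predicate form
theorem pv_foldl_break (l : List Int) (p : Int → Bool) (v : Int) :
    l.foldl (fun ok q => if ok = 0 then ok else if p q then 0 else ok) v
      = if v = 0 then 0 else if l.any p then 0 else v := by
  induction l generalizing v with
  | nil => simp
  | cons q l ih =>
    by_cases hv : v = 0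
    · subst hv; simp [ih]
    · cases hp : p q
      · simp [hv, hp, ih]
      · simp [hv, hp, ih]

-- "position k collides with a later position ≤ j"
def pvHit (c : List (List Int)) (j k : Int) : Bool :=
  (PySem.List.pyRange (k + 1) (j + 1) 1).any
    (fun q => pvKey (PySem.List.pyGetD c k []) == pvKey (PySem.List.pyGetD c q []))

-- okFor is 1 exactly when no position of the window collides with a later one
theorem pv_okFor_one_iff (c : List (List Int)) (i j : Int) :
    okFor c i j = 1 ↔ (PySem.List.pyRange i (j + 1) 1).any (pvHit c j) = false := by
  unfold okFor
  have hfun : (fun (ok k : Int) =>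
      if ok = 0 then ok else
        (PySem.List.pyRange (k + 1) (j + 1) 1).foldl (fun ok q =>
          if ok = 0 then ok else
            if check_equality (PySem.List.pyGetD c k []) (PySem.List.pyGetD c q []) = 1
            then 0 else ok) ok)
      = (fun (ok k : Int) => if ok = 0 then ok else if pvHit c j k then 0 else ok) := by
    funext ok k
    by_cases hok : ok = 0
    · simp [hok]
    · have hb : ∀ (a b : List Int) (w : Int),
          (if check_equality a b = 1 then (0 : Int) else w)
            = (if (pvKey a == pvKey b) then (0 : Int) else w) := by
        intro a b w
        by_cases h : check_equality a b = 1
        · rw [if_pos h, if_pos (by simpa [beq_iff_eq] using (pv_checkEq a b).mp h)]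
        · rw [if_neg h, if_neg (by simpa [beq_iff_eq] using fun h' => h ((pv_checkEq a b).mpr h'))]
      simp only [if_neg hok, hb]
      rw [pv_foldl_break _ (fun q => pvKey (PySem.List.pyGetD c k []) == pvKey (PySem.List.pyGetD c q [])) ok]
      simp [hok, pvHit]
  rw [hfun, pv_foldl_break _ (pvHit c j) 1]
  cases h : (PySem.List.pyRange i (j + 1) 1).any (pvHit c j) <;> simp

-- pvRun is bounded by the list length
theorem pv_run_le (s : List (List Int)) (seen : PySem.Set (Int × Int)) :
    pvRun s seen ≤ s.length := by
  induction s generalizing seen with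
  | nil => simp [pvRun]
  | cons x xs ih =>
    simp only [pvRun]
    split_ifs
    · simp
    · simpa using ih (seen.add (pvKey x))

-- a prefix of length m has pairwise-distinct keys avoiding `seen` iff m ≤ pvRun
theorem pv_run_iff (s : List (List Int)) (seen : PySem.Set (Int × Int)) (m : Nat)
    (hm : m ≤ s.length) :
    (m ≤ pvRun s seen) ↔
      ((s.take m).Pairwise (fun x y => pvKey x ≠ pvKey y) ∧
        ∀ y ∈ s.take m, seen.contains (pvKey y) = false) := by
  induction s generalizing seen m with
  | nil => simp at hm; simp [hm]
  | cons x xs ih =>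
    cases m with
    | zero => simp
    | succ m =>
      simp only [pvRun, List.take_succ_cons, List.pairwise_cons, List.mem_cons]
      cases hc : seen.contains (pvKey x) with
      | true =>
        simp only [reduceIte]
        constructor
        · omega
        · rintro ⟨-, hfree⟩
          have hx := hfree x (Or.inl rfl)
          rw [hc] at hx
          exact absurd hx (by simp)
      | false =>
        simp only [Bool.false_eq_true, if_false]
        rw [show (m + 1 ≤ pvRun xs (seen.add (pvKey x)) + 1) ↔ (m ≤ pvRun xs (seen.add (pvKey x))) by omega]
        rw [ih (seen.add (pvKey x)) m (by simpa using hm)]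
        have hadd : ∀ y : List Int,
            ((seen.add (pvKey x)).contains (pvKey y) = false)
              ↔ (pvKey y ≠ pvKey x ∧ seen.contains (pvKey y) = false) := by
          intro y
          simp [PySem.Set.contains, PySem.Set.mem_add]
          tauto
        constructor
        · rintro ⟨hpw, hfree⟩
          refine ⟨⟨fun y hy he => ((hadd y).mp (hfree y hy)).1 he.symm, hpw⟩, ?_⟩
          rintro y (rfl | hy)
          · exact hc
          · exact ((hadd y).mp (hfree y hy)).2
        · rintro ⟨⟨hx, hpw⟩, hfree⟩
          refine ⟨hpw, fun y hy => (hadd y).mpr ⟨fun he => hx y hy he.symm, hfree y (Or.inr hy)⟩⟩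

-- okFor in terms of pairwise key-distinctness of the window c[i : a+1]
theorem pv_ok_iff_pairwise (c : List (List Int)) (i a : Int) (h0 : 0 ≤ i) (hia : i ≤ a)
    (han : a < (c.length : Int)) :
    okFor c i a = 1 ↔
      ((c.drop i.toNat).take (a.toNat + 1 - i.toNat)).Pairwise (fun x y => pvKey x ≠ pvKey y) := by
  rw [pv_okFor_one_iff, List.any_eq_false]
  have hlen : ((c.drop i.toNat).take (a.toNat + 1 - i.toNat)).length = a.toNat + 1 - i.toNat := by
    simp [List.length_take, List.length_drop]; omega
  rw [List.pairwise_iff_getElem]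
  constructor
  · -- no index collision → pairwise
    intro hno t u ht hu htu
    rw [hlen] at ht hu
    rw [List.getElem_take, List.getElem_drop, List.getElem_take, List.getElem_drop]
    have hkq := hno (i + t) (by rw [PySem.List.mem_pyRange_one]; omega)
    unfold pvHit at hkq
    rw [Bool.not_eq_true, List.any_eq_false] at hkq
    have hone := hkq (i + u) (by rw [PySem.List.mem_pyRange_one]; omega)
    simp only [beq_iff_eq] at hone
    rw [show (i + (t : Int)) = ((i.toNat + t : Nat) : Int) by omega,
        show (i + (u : Int)) = ((i.toNat + u : Nat) : Int) by omega] at hone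
    simp only [PySem.List.pyGetD_natCast] at hone
    rw [List.getD_eq_getElem c [] (by omega), List.getD_eq_getElem c [] (by omega)] at hone
    exact hone
  · -- pairwise → no index collision
    intro hpw k hk
    rw [PySem.List.mem_pyRange_one] at hk
    unfold pvHit
    rw [Bool.not_eq_true, List.any_eq_false]
    intro q hq
    rw [PySem.List.mem_pyRange_one] at hq
    simp only [beq_iff_eq]
    rw [show k = ((k.toNat : Nat) : Int) by omega, show q = ((q.toNat : Nat) : Int) by omega]
    simp only [PySem.List.pyGetD_natCast]
    rw [List.getD_eq_getElem c [] (by omega), List.getD_eq_getElem c [] (by omega)]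
    have ht : (k - i).toNat < ((c.drop i.toNat).take (a.toNat + 1 - i.toNat)).length := by
      rw [hlen]; omega
    have hu : (q - i).toNat < ((c.drop i.toNat).take (a.toNat + 1 - i.toNat)).length := by
      rw [hlen]; omega
    have hne := hpw (k - i).toNat (q - i).toNat ht hu (by omega)
    rw [List.getElem_take, List.getElem_drop, List.getElem_take, List.getElem_drop] at hne
    have e1 : i.toNat + (k - i).toNat = k.toNat := by omega
    have e2 : i.toNat + (q - i).toNat = q.toNat := by omega
    simp only [e1, e2] at hne
    exact hne

-- okFor in terms of B's run length at start i
theorem pv_ok_iff_run (c : List (List Int)) (i a : Int) (h0 : 0 ≤ i) (hia : i ≤ a)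
    (han : a < (c.length : Int)) :
    (okFor c i a = 1) ↔ a < i + ((pvRun (c.drop i.toNat) PySem.Set.empty : Nat) : Int) := by
  rw [pv_ok_iff_pairwise c i a h0 hia han]
  have hm : a.toNat + 1 - i.toNat ≤ (c.drop i.toNat).length := by
    simp [List.length_drop]; omega
  have h2 := pv_run_iff (c.drop i.toNat) PySem.Set.empty (a.toNat + 1 - i.toNat) hm
  have h3 : ∀ y ∈ (c.drop i.toNat).take (a.toNat + 1 - i.toNat),
      PySem.Set.empty.contains (pvKey y) = false := by
    intro y _
    simp [PySem.Set.empty, PySem.Set.contains]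
  constructor
  · intro hp
    have := h2.mpr ⟨hp, h3⟩
    omega
  · intro hlt
    exact (h2.mp (by omega)).1

-- A's inner j-loop, fully characterized by the run length at start i (fuel = remaining range)
theorem pv_jloop (c : List (List Int)) (i : Int) (h0 : 0 ≤ i) (hin : i < (c.length : Int)) :
    ∀ (fuel : Nat) (a : Int) (st : Int × List (List Int)), i ≤ a →
      ((c.length : Int) - a).toNat = fuel →
    (PySem.List.pyRange a (c.length : Int) 1).foldl
      (fun st j =>
        if okFor c i j = 1 then
          (if j - i + 1 > st.1 then (j - i + 1, PySem.List.slice c (some i) (some (j + 1))) else st)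
        else st) st
    = (if st.1 < ((pvRun (c.drop i.toNat) PySem.Set.empty : Nat) : Int)
          ∧ a < i + ((pvRun (c.drop i.toNat) PySem.Set.empty : Nat) : Int)
       then (((pvRun (c.drop i.toNat) PySem.Set.empty : Nat) : Int),
             PySem.List.slice c (some i)
               (some (i + ((pvRun (c.drop i.toNat) PySem.Set.empty : Nat) : Int))))
       else st) := by
  set L : Int := ((pvRun (c.drop i.toNat) PySem.Set.empty : Nat) : Int) with hL
  have hLle : L ≤ (c.length : Int) - i := by
    have h1 := pv_run_le (c.drop i.toNat) PySem.Set.empty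
    rw [List.length_drop] at h1
    omega
  have hL0 : 0 ≤ L := by positivity
  intro fuel
  induction fuel with
  | zero =>
    intro a st ha hfuel
    rw [PySem.List.pyRange_one_eq_nil (by omega)]
    rw [if_neg (by omega)]
    rfl
  | succ fuel ih =>
    intro a st ha hfuel
    have halt : a < (c.length : Int) := by omega
    rw [PySem.List.pyRange_one_cons halt, List.foldl_cons]
    have hok := pv_ok_iff_run c i a h0 ha halt
    rw [← hL] at hok
    by_cases hdis : a < i + L
    · rw [if_pos (hok.mpr hdis)]
      by_cases hgt : a - i + 1 > st.1
      · rw [if_pos hgt]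
        rw [ih (a + 1) (a - i + 1, PySem.List.slice c (some i) (some (a + 1))) (by omega) (by omega)]
        by_cases hend : a + 1 < i + L
        · rw [if_pos ⟨by simp; omega, hend⟩, if_pos ⟨by omega, hdis⟩]
        · have e : i + L = a + 1 := by omega
          have e2 : L = a - i + 1 := by omega
          rw [if_neg (by simp; omega), if_pos ⟨by omega, hdis⟩, e, e2]
      · rw [if_neg hgt]
        rw [ih (a + 1) st (by omega) (by omega)]
        by_cases hend : a + 1 < i + L
        · by_cases hst : st.1 < L
          · rw [if_pos ⟨hst, hend⟩, if_pos ⟨hst, hdis⟩]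
          · rw [if_neg (by tauto), if_neg (by tauto)]
        · rw [if_neg (by omega), if_neg (by omega)]
    · rw [if_neg (fun h => absurd (hok.mp h) hdis)]
      rw [ih (a + 1) st (by omega) (by omega)]
      rw [if_neg (by omega), if_neg (by omega)]

-- lockstep of A's outer fold and B's pvBest
theorem pv_outer (c : List (List Int)) :
    ∀ (s : List (List Int)) (i bs bl : Int), 0 ≤ i → 0 ≤ bs → 0 ≤ bl →
      s = c.drop i.toNat → (i : Int) + (s.length : Int) = (c.length : Int) →
      (PySem.List.pyRange i (c.length : Int) 1).foldl
        (fun (st : Int × List (List Int)) i' =>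
          (PySem.List.pyRange i' (c.length : Int) 1).foldl
            (fun st j =>
              if okFor c i' j = 1 then
                (if j - i' + 1 > st.1 then
                   (j - i' + 1, PySem.List.slice c (some i') (some (j + 1)))
                 else st)
              else st) st)
        (bl, PySem.List.slice c (some bs) (some (bs + bl)))
      = ((pvBest s i (bs, bl)).2,
         PySem.List.slice c (some (pvBest s i (bs, bl)).1)
           (some ((pvBest s i (bs, bl)).1 + (pvBest s i (bs, bl)).2))) := by
  intro s
  induction s with
  | nil =>
    intro i bs bl h0 hbs hbl hdrop hlen
    simp only [List.length_nil, Nat.cast_zero, add_zero] at hlen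
    rw [hlen, PySem.List.pyRange_one_eq_nil le_rfl]
    simp [pvBest]
  | cons x xs ih =>
    intro i bs bl h0 hbs hbl hdrop hlen
    have hin : i < (c.length : Int) := by simp at hlen; omega
    rw [PySem.List.pyRange_one_cons hin, List.foldl_cons]
    rw [pv_jloop c i h0 hin (((c.length : Int) - i).toNat) i
        (bl, PySem.List.slice c (some bs) (some (bs + bl))) le_rfl rfl]
    rw [← hdrop]
    simp only [pvBest]
    set L : Int := ((pvRun (x :: xs) PySem.Set.empty : Nat) : Int) with hL
    have hdrop1 : xs = c.drop (i + 1).toNat := by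
      have h1 : c.drop (i + 1).toNat = (c.drop i.toNat).drop 1 := by
        rw [List.drop_drop]; congr 1; omega
      rw [h1, ← hdrop]; rfl
    have hlen1 : (i + 1 : Int) + (xs.length : Int) = (c.length : Int) := by
      simp at hlen ⊢; omega
    by_cases hcond : bl < L
    · rw [if_pos ⟨hcond, by omega⟩, if_pos (by simpa using hcond)]
      have := ih (i + 1) i L (by omega) h0 (by positivity) hdrop1 hlen1
      simpa using this
    · rw [if_neg (by tauto), if_neg (by simpa using hcond)]
      exact ih (i + 1) bs bl (by omega) hbs hbl hdrop1 hlen1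

-- ===== VERDICT (by name: the statement is the Claim_ definition above) =====
theorem distinct_sequence_spec : Claim_equal_distinct_sequence := by
  intro c _ _
  unfold Spec_distinct_sequence distinct_sequence distinct_sequence_alt
  have h := pv_outer c c 0 0 0 le_rfl le_rfl le_rfl (by simp) (by simp)
  have hslice : PySem.List.slice c (some (0 : Int)) (some ((0 : Int) + 0)) = [] := by
    rw [show (some ((0 : Int) + 0)) = some (((0 : Nat) : Int)) by norm_num,
        show (some (0 : Int)) = some (((0 : Nat) : Int)) by norm_num,
        PySem.List.slice_natCast]
    simp
  rw [hslice] at h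
  rw [h]
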